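-- pv_equiv track=rewrite | github.com/eunzi-kim/AL-S | 태성/비밀지도.py | mk_2
-- ===== SOURCE A (Python) =====
-- def mk_2(k, n):
--     res = []
--     while k>0:
--         j = k%2
--         res.append(j)
--         k = k//2
--
--     d = n - len(res)
--
--     l_res = list(reversed(res))
--
--
--     pre_res = [0]*d
--     res = pre_res + l_res
--
--     return res
-- ===== SOURCE B (Python) =====
-- def mk_2(k, n):
--     if k <= 0:
--         return [0] * n
--     L = max(n, k.bit_length())
--     return [(k >> i) & 1 for i in range(L - 1, -1, -1)]
-- ===== Notes on version B (the rewrite author's own statement) =====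
-- stated objective: idiomatic
-- what changed: Replaces A's LSB remainder-accumulation loop plus reversal plus separate zero-padding concatenation with a single MSB-first comprehension extracting each bit positionally via shift-and-mask over range(max(n, k.bit_length())-1, -1, -1).
import Mathlib
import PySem

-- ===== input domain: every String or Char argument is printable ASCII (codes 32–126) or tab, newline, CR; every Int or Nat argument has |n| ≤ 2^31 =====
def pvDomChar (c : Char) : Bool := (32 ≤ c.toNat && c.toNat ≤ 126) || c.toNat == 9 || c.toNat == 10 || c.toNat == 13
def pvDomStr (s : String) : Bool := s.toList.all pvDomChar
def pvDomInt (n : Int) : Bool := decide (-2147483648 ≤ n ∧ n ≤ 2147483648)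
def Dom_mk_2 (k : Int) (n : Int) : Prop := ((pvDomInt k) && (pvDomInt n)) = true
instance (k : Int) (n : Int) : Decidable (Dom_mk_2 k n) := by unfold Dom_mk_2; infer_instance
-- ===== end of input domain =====

-- B replaces A's LSB remainder loop + reversal + zero-padding concatenation with one
-- MSB-first positional shift-and-mask comprehension (objective: idiomatic; same cost).

-- ===== PORT A =====
-- the 'while k>0: res.append(k%2); k = k//2' loop of A
def mkBitsA (k : Int) : List Int :=
  if h : 0 < k then PySem.Int.mod k 2 :: mkBitsA (PySem.Int.floordiv k 2) else []
termination_by k.toNat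
decreasing_by
  have h2 : PySem.Int.floordiv k 2 = k / 2 := PySem.Int.floordiv_eq_ediv_of_pos (by omega)
  rw [h2]; omega

def mk_2 (k : Int) (n : Int) : List Int :=
  let res := mkBitsA k
  let d : Int := n - res.length
  let l_res := res.reverse
  let pre_res := List.replicate d.toNat (0 : Int)   -- [0]*d is [] for d < 0, exact
  pre_res ++ l_res

-- ===== PORT B =====
def mk_2_alt (k : Int) (n : Int) : List Int :=
  if k ≤ 0 then List.replicate n.toNat (0 : Int)    -- [0]*n is [] for n < 0, exact
  else
    let L : Int := max n (PySem.Int.bitLength k : Int)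
    (PySem.List.pyRange (L - 1) (-1) (-1)).map (fun i => PySem.Int.band (k >>> i.toNat) 1)

-- ===== PRECONDITION & SPEC =====
def Spec_mk_2 (k : Int) (n : Int) (out : List Int) : Prop := out = mk_2_alt k n
instance (k : Int) (n : Int) (out : List Int) : Decidable (Spec_mk_2 k n out) := by unfold Spec_mk_2; infer_instance

-- ===== CLAIM (what is proved, stated in full; the proofs are below) =====
def Claim_equal_mk_2 : Prop := ∀ (k : Int) (n : Int), Dom_mk_2 k n → Spec_mk_2 k n (mk_2 k n)

-- ===== LEMMAS AND PROOFS =====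

lemma mkBitsA_nonpos {k : Int} (h : ¬ 0 < k) : mkBitsA k = [] := by
  rw [mkBitsA]; simp [h]

lemma mkBitsA_natCast (m : Nat) :
    mkBitsA (m : Int) = if 0 < m then ((m % 2 : Nat) : Int) :: mkBitsA ((m / 2 : Nat) : Int) else [] := by
  rw [mkBitsA]
  split_ifs with h1 h2
  · congr 1
    · exact_mod_cast PySem.Int.mod_natCast m 2
    · congr 1; exact_mod_cast PySem.Int.floordiv_natCast m 2
  · omega
  · omega
  · rfl

lemma mkBitsA_length (m : Nat) : (mkBitsA (m : Int)).length = PySem.Int.bitLength (m : Int) := by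
  induction m using Nat.strong_induction_on with
  | _ m ih =>
    rw [mkBitsA_natCast]
    by_cases h : 0 < m
    · simp only [h, if_pos]
      rw [List.length_cons, ih (m / 2) (by omega), PySem.Int.bitLength_natCast h]
    · interval_cases m
      simp [PySem.Int.bitLength_zero]

-- core: MSB-first positional bits of length M ≥ bitLength equal A's LSB list plus trailing zeros
lemma bits_core (m : Nat) : ∀ (M : Nat), PySem.Int.bitLength (m : Int) ≤ M →
    (List.range M).map (fun (j : Nat) => PySem.Int.band ((m : Int) >>> j) 1)
      = mkBitsA (m : Int) ++ List.replicate (M - PySem.Int.bitLength (m : Int)) (0 : Int) := by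
  induction m using Nat.strong_induction_on with
  | _ m ih =>
    intro M hM
    by_cases h : 0 < m
    · have hbl := PySem.Int.bitLength_natCast h
      have hM1 : ∃ M', M = M' + 1 := ⟨M - 1, by omega⟩
      obtain ⟨M', rfl⟩ := hM1
      rw [List.range_succ_eq_map, List.map_cons, List.map_map]
      have hshift : ∀ (j : Nat),
          ((m : Int) >>> (j + 1)) = (((m / 2 : Nat) : Int) >>> j) := by
        intro j
        show ((m >>> (j + 1) : Nat) : Int) = (((m / 2) >>> j : Nat) : Int)
        norm_cast
        rw [show j + 1 = 1 + j by omega, Nat.shiftRight_add]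
        rfl
      have htail : (List.range M').map ((fun (j : Nat) => PySem.Int.band ((m : Int) >>> j) 1) ∘ Nat.succ)
          = (List.range M').map (fun (j : Nat) => PySem.Int.band (((m / 2 : Nat) : Int) >>> j) 1) := by
        apply List.map_congr_left
        intro j _
        simp only [Function.comp_apply, Nat.succ_eq_add_one, hshift j]
      rw [htail, ih (m / 2) (by omega) M' (by omega)]
      conv_rhs => rw [mkBitsA_natCast m, if_pos h]
      have hhead : PySem.Int.band ((m : Int) >>> (0 : Nat)) 1 = ((m % 2 : Nat) : Int) := by
        show PySem.Int.band ((m : Int)) 1 = ((m % 2 : Nat) : Int)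
        rw [PySem.Int.band_one]
        exact_mod_cast PySem.Int.mod_natCast m 2
      rw [hhead]
      simp only [List.cons_append]
      rw [hbl]
      have hx : M' + 1 - (PySem.Int.bitLength ((m / 2 : Nat) : Int) + 1)
          = M' - PySem.Int.bitLength ((m / 2 : Nat) : Int) := by omega
      rw [hx]
    · interval_cases m
      rw [mkBitsA_nonpos (by omega)]
      simp only [List.nil_append]
      rw [List.eq_replicate_iff]
      refine ⟨by simp [PySem.Int.bitLength_zero], ?_⟩
      intro b hb
      simp only [List.mem_map] at hb
      obtain ⟨j, _, rfl⟩ := hb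
      show PySem.Int.band (((0 : Nat) : Int) >>> j) 1 = 0
      rw [show (((0 : Nat) : Int) >>> j) = (((0 >>> j : Nat)) : Int) from rfl,
        Nat.zero_shiftRight]
      decide

lemma mk_2_eq_alt_pos (k n : Int) (hk : 0 < k) : mk_2 k n = mk_2_alt k n := by
  obtain ⟨m, rfl⟩ : ∃ m : Nat, k = (m : Int) := ⟨k.toNat, by omega⟩
  have hm : 0 < m := by exact_mod_cast hk
  simp only [mk_2, mk_2_alt]
  rw [if_neg (by omega)]
  set bl := PySem.Int.bitLength (m : Int) with hbl
  have hbl1 : 1 ≤ bl := by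
    rw [hbl, PySem.Int.bitLength_natCast hm]; omega
  have hL : max n (bl : Int) - 1 + 1 = ((max n (bl : Int)).toNat : Int) := by omega
  rw [PySem.List.pyRange_neg_one_eq_reverse, hL]
  rw [show ((-1 : Int) + 1) = 0 by norm_num]
  rw [PySem.List.pyRange_zero_natCast, List.map_reverse, List.map_map]
  have hcomp : (List.range ((max n (bl : Int)).toNat)).map
      ((fun i => PySem.Int.band ((m : Int) >>> i.toNat) 1) ∘ (fun (j : Nat) => (j : Int)))
      = (List.range ((max n (bl : Int)).toNat)).map (fun (j : Nat) => PySem.Int.band ((m : Int) >>> j) 1) := by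
    apply List.map_congr_left
    intro j _
    simp [Function.comp_apply]
  rw [hcomp, bits_core m ((max n (bl : Int)).toNat) (by omega)]
  rw [List.reverse_append, List.reverse_replicate]
  congr 1
  congr 1
  rw [mkBitsA_length]
  omega

-- ===== VERDICT (by name: the statement is the Claim_ definition above) =====
theorem mk_2_spec : Claim_equal_mk_2 := by
  intro k n _
  unfold Spec_mk_2
  by_cases hk : 0 < k
  · exact mk_2_eq_alt_pos k n hk
  · simp only [mk_2, mk_2_alt]
    rw [mkBitsA_nonpos hk, if_pos (by omega)]
    simp
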